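-- pv_equiv track=rewrite | github.com/Almiqdad/Equation--Solver | github code.py | numBefore
-- ===== SOURCE A (Python) =====
-- def flip(string):
--     #initialize a strig to contain flipped version of the argument
--     flipped=''
--     #go through each character, starting from the end and put in in
--     #the result string
--     for i in range(len(string)):
--         flipped = flipped+string[len(string)-1-i]
--     #return the result string
--     return flipped
--
-- def numBefore(index,string):
--     #define possible digits
--     digits = ['0','1','2','3','4','5','6','7','8','9','.','/','*']
--     #initialize string to contain the result
--     number = ''
--     #get the portion of the string am interested in
--     subString = string[:index]
--     #go from the given index,backwords
--     for i in range(len(subString)):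
--         #if you find a digit, add it to number string
--         if subString[len(subString)-i-1] in digits:
--             number = number+subString[len(subString)-i-1]
--         #if you find something that's not a digit, return whatever is in the number string, flipped
--         else:
--             return flip(number)
--     return flip(number)
-- ===== SOURCE B (Python) =====
-- def numBefore(index, string):
--     allowed = set('0123456789./*')
--     subString = string[:index]
--     start = 0
--     for i, c in enumerate(subString):
--         if c not in allowed:
--             start = i + 1
--     return subString[start:]
-- ===== Notes on version B (the rewrite author's own statement) =====
-- stated objective: simpler
-- what changed: A scans the substring backwards, accumulating allowed characters and reversing them with a helper loop; B makes one forward pass that records the position just past the last disallowed character and returns a single slice, with no accumulation or reversal.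
import Mathlib
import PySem

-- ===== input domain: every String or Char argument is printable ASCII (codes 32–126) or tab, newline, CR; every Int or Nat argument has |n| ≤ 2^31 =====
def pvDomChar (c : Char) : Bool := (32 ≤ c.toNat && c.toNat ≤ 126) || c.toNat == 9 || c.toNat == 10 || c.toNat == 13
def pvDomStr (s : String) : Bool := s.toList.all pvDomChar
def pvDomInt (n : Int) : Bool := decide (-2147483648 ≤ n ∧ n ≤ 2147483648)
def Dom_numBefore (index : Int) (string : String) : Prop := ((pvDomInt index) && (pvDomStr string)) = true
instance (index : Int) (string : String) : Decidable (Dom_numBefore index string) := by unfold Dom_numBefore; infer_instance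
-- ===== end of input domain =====

-- B replaces A's backward scan-with-reverse by a single forward pass that keeps the start
-- of the trailing allowed run and slices once (objective: simpler).

-- ===== PORT A =====
-- A's allowed-character list
def pvDigitsA : List Char := ['0','1','2','3','4','5','6','7','8','9','.','/','*']

-- flip: loop i in range(len(string)), flipped = flipped + string[len-1-i]
-- (indices are always in range here, so pyGetD is exact)
def flipA (s : List Char) : List Char :=
  (PySem.List.pyRange 0 (s.length : Int) 1).foldl
    (fun flipped i => flipped ++ [PySem.List.pyGetD s ((s.length : Int) - 1 - i) ' ']) []

-- the loop of numBefore, with its early return, as recursion on the loop counter i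
def numLoopA (sub : List Char) (i : Nat) (number : List Char) : List Char :=
  if _h : i < sub.length then
    let c := PySem.List.pyGetD sub ((sub.length : Int) - (i : Int) - 1) ' '
    if c ∈ pvDigitsA then numLoopA sub (i + 1) (number ++ [c])
    else flipA number
  else flipA number
termination_by sub.length - i

def numBefore (index : Int) (string : String) : String :=
  let subString := PySem.List.slice string.toList none (some index)
  String.ofList (numLoopA subString 0 [])

-- ===== PORT B =====
def pvAllowedB : PySem.Set Char := PySem.Set.ofList "0123456789./*".toList

def numBefore_alt (index : Int) (string : String) : String :=
  let subString := PySem.List.slice string.toList none (some index)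
  let start : Int :=
    (PySem.List.enumerate subString 0).foldl
      (fun start p => if p.2 ∈ pvAllowedB then start else p.1 + 1) 0
  String.ofList (PySem.List.slice subString (some start) none)

-- ===== PRECONDITION & SPEC =====
def Spec_numBefore (index : Int) (string : String) (out : String) : Prop := out = numBefore_alt index string
instance (index : Int) (string : String) (out : String) : Decidable (Spec_numBefore index string out) := by unfold Spec_numBefore; infer_instance

-- ===== CLAIM (what is proved, stated in full; the proofs are below) =====
def Claim_equal_numBefore : Prop := ∀ (index : Int) (string : String), Dom_numBefore index string → Spec_numBefore index string (numBefore index string)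

-- ===== LEMMAS AND PROOFS =====

theorem flipA_eq (s : List Char) : flipA s = s.reverse := by
  unfold flipA
  rw [PySem.List.pyRange_zero_natCast, PySem.List.foldl_append_singleton_eq_map]
  apply List.ext_getElem
  · simp
  · intro i h1 h2
    have hi : i < s.length := by simpa using h1
    have hcast : ((s.length : Int) - 1 - ((i : Nat) : Int)) = ((s.length - 1 - i : Nat) : Int) := by omega
    simp only [List.nil_append, List.getElem_map, List.getElem_range, hcast,
      PySem.List.pyGetD_natCast, List.getElem_reverse]
    exact List.getD_eq_getElem s ' ' (by omega)

theorem numLoopA_eq (sub : List Char) :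
    ∀ i number, numLoopA sub i number =
      (number ++ (sub.reverse.drop i).takeWhile (· ∈ pvDigitsA)).reverse := by
  suffices H : ∀ n i number, sub.length - i ≤ n → numLoopA sub i number =
      (number ++ (sub.reverse.drop i).takeWhile (· ∈ pvDigitsA)).reverse by
    intro i number; exact H _ i number le_rfl
  intro n
  induction n with
  | zero =>
    intro i number h
    have hi : ¬ i < sub.length := by omega
    rw [numLoopA]
    simp [hi, flipA_eq]
  | succ n ih =>
    intro i number h
    rw [numLoopA]
    by_cases hi : i < sub.length
    · simp only [hi, dif_pos]
      have hcast : ((sub.length : Int) - ((i : Nat) : Int) - 1) = ((sub.length - i - 1 : Nat) : Int) := by omega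
      have hc : PySem.List.pyGetD sub ((sub.length : Int) - ((i : Nat) : Int) - 1) ' ' = sub.reverse[i]'(by simpa using hi) := by
        rw [hcast, PySem.List.pyGetD_natCast, List.getElem_reverse,
          List.getD_eq_getElem sub ' ' (by omega)]
        congr 1
        omega
      have hdrop : sub.reverse.drop i = sub.reverse[i]'(by simpa using hi) :: sub.reverse.drop (i + 1) :=
        List.drop_eq_getElem_cons (by simpa using hi)
      by_cases hd : sub.reverse[i]'(by simpa using hi) ∈ pvDigitsA
      · rw [hc, if_pos hd, ih (i + 1) _ (by omega), hdrop, List.takeWhile_cons,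
          if_pos (by simpa using hd), List.append_assoc]
        rfl
      · rw [hc, if_neg hd, flipA_eq, hdrop, List.takeWhile_cons, if_neg (by simpa using hd)]
        simp
    · simp [hi, flipA_eq]

def startB (sub : List Char) : Int :=
  (PySem.List.enumerate sub 0).foldl
    (fun start p => if p.2 ∈ pvAllowedB then start else p.1 + 1) 0

theorem startB_append (xs : List Char) (c : Char) :
    startB (xs ++ [c]) = if c ∈ pvAllowedB then startB xs else (xs.length : Int) + 1 := by
  unfold startB
  rw [PySem.List.enumerate_append, List.foldl_append]
  by_cases h : c ∈ pvAllowedB <;>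
    simp [PySem.List.enumerate_cons, PySem.List.enumerate_nil, h]

theorem startB_bounds (sub : List Char) : 0 ≤ startB sub ∧ startB sub ≤ (sub.length : Int) := by
  induction sub using List.reverseRecOn with
  | nil => simp [startB, PySem.List.enumerate_nil]
  | append_singleton xs c ih =>
    rw [startB_append]
    by_cases h : c ∈ pvAllowedB <;> simp [h] <;> omega

theorem mem_allowed_iff (c : Char) : (c ∈ pvAllowedB) ↔ (c ∈ pvDigitsA) := by
  have h : pvAllowedB = pvDigitsA := by decide
  rw [h]

theorem drop_startB (sub : List Char) :
    sub.drop (startB sub).toNat = (sub.reverse.takeWhile (· ∈ pvDigitsA)).reverse := by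
  induction sub using List.reverseRecOn with
  | nil => simp [startB, PySem.List.enumerate_nil]
  | append_singleton xs c ih =>
    rw [startB_append]
    by_cases h : c ∈ pvAllowedB
    · have hd : c ∈ pvDigitsA := (mem_allowed_iff c).mp h
      have hb := startB_bounds xs
      simp only [h, if_pos]
      rw [List.drop_append_of_le_length (by omega), ih]
      simp [hd]
    · have hd : ¬ c ∈ pvDigitsA := fun hc => h ((mem_allowed_iff c).mpr hc)
      simp only [h, if_neg, not_false_iff]
      have hlen : ((xs.length : Int) + 1).toNat = xs.length + 1 := by omega
      rw [hlen]
      simp [hd, List.drop_eq_nil_of_le]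

-- ===== VERDICT (by name: the statement is the Claim_ definition above) =====
theorem numBefore_alt_eq (index : Int) (string : String) :
    numBefore_alt index string =
      String.ofList (PySem.List.slice (PySem.List.slice string.toList none (some index))
        (some (startB (PySem.List.slice string.toList none (some index)))) none) := rfl

theorem numBefore_spec : Claim_equal_numBefore := by
  intro index string _
  unfold Spec_numBefore
  rw [numBefore_alt_eq]
  show String.ofList (numLoopA (PySem.List.slice string.toList none (some index)) 0 []) = _
  set sub := PySem.List.slice string.toList none (some index) with hsub
  rw [numLoopA_eq sub 0 [], PySem.List.slice_from sub (startB_bounds sub).1, drop_startB sub]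
  simp
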